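-- pv_equiv track=rewrite | github.com/nitin35byte/new_prython_practise_repo | Prepbite/Smaller Greater Equal Numbers.py | count_baskets
-- ===== SOURCE A (Python) =====
-- def count_baskets(N, K, baskets):
--     L = M = E = 0
--     for factor in baskets:
--         if factor < K:
--             L += 1
--         elif factor > K:
--             M += 1
--         else:
--             E += 1
--     return L, M, E
-- ===== SOURCE B (Python) =====
-- def count_baskets(N, K, baskets):
--     L = sum(1 for f in baskets if f < K)
--     M = sum(1 for f in baskets if f > K)
--     E = baskets.count(K)
--     return L, M, E
-- ===== Notes on version B (the rewrite author's own statement) =====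
-- stated objective: simpler
-- what changed: Replaces the single accumulator loop with an if/elif/else over three counters by three independent traversals: two generator-sum scans for the < and > counts and list.count for equality.
import Mathlib
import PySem

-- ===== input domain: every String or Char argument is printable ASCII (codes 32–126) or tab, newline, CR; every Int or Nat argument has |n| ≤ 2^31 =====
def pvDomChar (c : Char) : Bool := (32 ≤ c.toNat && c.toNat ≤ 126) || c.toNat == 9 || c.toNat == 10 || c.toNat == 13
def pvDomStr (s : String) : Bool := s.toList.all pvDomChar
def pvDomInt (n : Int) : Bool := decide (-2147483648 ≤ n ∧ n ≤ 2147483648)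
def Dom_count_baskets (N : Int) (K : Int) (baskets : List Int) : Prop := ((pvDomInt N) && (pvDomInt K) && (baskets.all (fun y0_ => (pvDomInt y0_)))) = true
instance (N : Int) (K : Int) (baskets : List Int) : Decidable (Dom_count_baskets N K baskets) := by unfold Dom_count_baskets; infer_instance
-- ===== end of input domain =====

-- B replaces A's single three-way-branching accumulator loop with three independent scans (two filtered counts and one equality count): objective = simpler.

-- ===== PORT A =====
-- one pass, triple accumulator, if/elif/else as in A
def count_baskets (N : Int) (K : Int) (baskets : List Int) : Int × Int × Int :=
  let s := baskets.foldl
    (fun (acc : Int × Int × Int) factor =>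
      let (L, M, E) := acc
      if factor < K then (L + 1, M, E)
      else if factor > K then (L, M + 1, E)
      else (L, M, E + 1))
    (0, 0, 0)
  s

-- ===== PORT B =====
-- three independent traversals, as in Source B: sum(1 for f if f<K), sum(1 for f if f>K), baskets.count(K)
def count_baskets_alt (N : Int) (K : Int) (baskets : List Int) : Int × Int × Int :=
  let L : Int := ((baskets.filter (fun f => decide (f < K))).map (fun _ => (1 : Int))).sum
  let M : Int := ((baskets.filter (fun f => decide (f > K))).map (fun _ => (1 : Int))).sum
  let E : Int := PySem.List.count baskets K
  (L, M, E)

-- ===== PRECONDITION & SPEC =====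
def Spec_count_baskets (N : Int) (K : Int) (baskets : List Int) (out : Int × Int × Int) : Prop := out = count_baskets_alt N K baskets
instance (N : Int) (K : Int) (baskets : List Int) (out : Int × Int × Int) : Decidable (Spec_count_baskets N K baskets out) := by unfold Spec_count_baskets; infer_instance

-- ===== CLAIM (what is proved, stated in full; the proofs are below) =====
def Claim_equal_count_baskets : Prop := ∀ (N : Int) (K : Int) (baskets : List Int), Dom_count_baskets N K baskets → Spec_count_baskets N K baskets (count_baskets N K baskets)

-- ===== LEMMAS AND PROOFS =====

-- loop invariant: A's fold from any start state adds B's three counts componentwise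
theorem count_baskets_fold_inv (K : Int) (baskets : List Int) (L M E : Int) :
    baskets.foldl
      (fun (acc : Int × Int × Int) factor =>
        let (l, m, e) := acc
        if factor < K then (l + 1, m, e)
        else if factor > K then (l, m + 1, e)
        else (l, m, e + 1))
      (L, M, E)
    = (L + ((baskets.filter (fun f => decide (f < K))).map (fun _ => (1 : Int))).sum,
       M + ((baskets.filter (fun f => decide (f > K))).map (fun _ => (1 : Int))).sum,
       E + PySem.List.count baskets K) := by
  induction baskets generalizing L M E with
  | nil => simp [PySem.List.count]
  | cons x xs ih =>
    by_cases h1 : x < K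
    · have h2 : ¬ x = K := by omega
      have h2' : ¬ K < x := by omega
      simp [List.foldl_cons, h1, ih, List.filter, PySem.List.count, h2, h2']
      omega
    · by_cases h2 : x > K
      · have h3 : ¬ x = K := by omega
        have h2' : K < x := by omega
        simp [List.foldl_cons, h1, h2', ih, List.filter, PySem.List.count, h3]
        omega
      · have h3 : x = K := by omega
        simp [List.foldl_cons, ih, List.filter, PySem.List.count, h3]
        omega

-- ===== VERDICT (by name: the statement is the Claim_ definition above) =====
theorem count_baskets_spec : Claim_equal_count_baskets := by
  intro N K baskets _
  unfold Spec_count_baskets count_baskets count_baskets_alt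
  simpa using count_baskets_fold_inv K baskets 0 0 0
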